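-- pv_equiv track=rewrite | github.com/withoutsummer/coding-test | 프로그래머스/1/133499. 옹알이 （2）/옹알이 （2）.py | solution
-- ===== SOURCE A (Python) =====
-- def solution(babbling):
--     pronounce = ["aya", "ye", "woo", "ma"]
--     count = 0
--
--     for ba in babbling:
--         i = 0
--         prev_ba =""
--         ok = True
--
--         while i < len(ba):
--             matched = False
--
--             for p in pronounce:
--
--                 if ba.startswith(p,i):
--
--                     if prev_ba == p:
--                         matched = False
--                         break
--
--                     i += len(p)
--                     prev_ba = p
--                     matched = True
--                     break
--
--             if not matched:
--                 ok = False
--                 break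
--
--         if ok:
--             count += 1
--
--     return count
-- ===== SOURCE B (Python) =====
-- def solution(babbling):
--     # B: separate recursive tokenization from the no-adjacent-repeat check.
--     def tokens(s):
--         if not s:
--             return []
--         for p in ("aya", "ye", "woo", "ma"):
--             if s.startswith(p):
--                 rest = tokens(s[len(p):])
--                 return None if rest is None else [p] + rest
--         return None
--
--     def no_repeat(ts):
--         if len(ts) < 2:
--             return True
--         return ts[0] != ts[1] and no_repeat(ts[1:])
--
--     return sum(1 for ba in babbling if (lambda ts: ts is not None and no_repeat(ts))(tokens(ba)))
-- ===== Notes on version B (the rewrite author's own statement) =====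
-- stated objective: alternative
-- what changed: B splits A's fused while/for loop into two independent phases: a greedy suffix-slicing tokenizer that returns the full syllable list (or None), followed by a separate adjacent-duplicate check over that list, counted with a generator sum.
import Mathlib
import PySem

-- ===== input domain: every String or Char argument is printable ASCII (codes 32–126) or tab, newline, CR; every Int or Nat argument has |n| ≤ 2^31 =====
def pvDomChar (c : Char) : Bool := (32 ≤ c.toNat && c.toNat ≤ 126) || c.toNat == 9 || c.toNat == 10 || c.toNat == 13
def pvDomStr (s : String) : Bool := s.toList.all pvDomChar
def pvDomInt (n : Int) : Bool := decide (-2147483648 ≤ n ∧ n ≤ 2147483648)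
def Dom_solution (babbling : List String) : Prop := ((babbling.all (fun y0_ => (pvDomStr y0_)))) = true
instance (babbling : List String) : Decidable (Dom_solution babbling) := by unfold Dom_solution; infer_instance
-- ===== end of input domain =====

-- B is an alternative decomposition of A (recursive tokenization first, separate
-- adjacent-repeat check second); same asymptotic cost.

-- ===== PORT A =====
-- pronounce = ["aya", "ye", "woo", "ma"]
def pronounceA : List (List Char) := [['a','y','a'], ['y','e'], ['w','o','o'], ['m','a']]

-- the inner `for p in pronounce` loop with its two `break`s:
-- returns none when the while-loop must stop with ok=False (either no p matched, or the
-- first matching p equals prev_ba), some (i', p) when it matched and advanced.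
-- Python's ba.startswith(p, i) with 0 ≤ i is exact as startswith (ba.drop i) p.
def aFor (ba : List Char) (prev : List Char) (i : Nat) :
    List (List Char) → Option (Nat × List Char)
  | [] => none
  | p :: ps =>
    if PySem.Chars.startswith (ba.drop i) p then
      if prev == p then none else some (i + p.length, p)
    else aFor ba prev i ps

-- facts the ports need for termination
theorem pronounceA_ne_nil : ∀ q ∈ pronounceA, q ≠ [] := by decide

theorem aFor_lt (ba prev : List Char) (i : Nat) (ps : List (List Char))
    (hps : ∀ q ∈ ps, q ≠ []) (i' : Nat) (p : List Char)
    (h : aFor ba prev i ps = some (i', p)) : i < i' := by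
  induction ps with
  | nil => simp [aFor] at h
  | cons q qs ih =>
    rw [aFor] at h
    split at h
    · split at h
      · exact absurd h (by simp)
      · have hq : q ≠ [] := hps q (by simp)
        have hql : 0 < q.length := List.length_pos_iff.mpr hq
        have := (Option.some.injEq _ _).mp h
        have h1 : i + q.length = i' := congrArg Prod.fst this
        omega
    · exact ih (fun r hr => hps r (by simp [hr])) h

-- the `while i < len(ba)` loop; returns the final value of `ok`
def aWhile (ba : List Char) (i : Nat) (prev : List Char) : Bool :=
  if i < ba.length then
    match h : aFor ba prev i pronounceA with
    | none => false
    | some (i', p) => aWhile ba i' p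
  else true
termination_by ba.length - i
decreasing_by
  have := aFor_lt ba prev i pronounceA pronounceA_ne_nil i' p h
  omega

def solution (babbling : List String) : Int :=
  babbling.foldl (fun count ba => if aWhile ba.toList 0 [] then count + 1 else count) 0

-- ===== PORT B =====
-- recursive greedy tokenizer: the matched syllable list, or none if stuck
-- (Source B's `for p in (…)` over the four literal syllables, written as the branch chain)
def tokensB : List Char → Option (List (List Char))
  | [] => some []
  | c :: rest =>
    if PySem.Chars.startswith (c :: rest) ['a','y','a'] then
      match tokensB ((c :: rest).drop 3) with
      | none => none
      | some ts => some (['a','y','a'] :: ts)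
    else if PySem.Chars.startswith (c :: rest) ['y','e'] then
      match tokensB ((c :: rest).drop 2) with
      | none => none
      | some ts => some (['y','e'] :: ts)
    else if PySem.Chars.startswith (c :: rest) ['w','o','o'] then
      match tokensB ((c :: rest).drop 3) with
      | none => none
      | some ts => some (['w','o','o'] :: ts)
    else if PySem.Chars.startswith (c :: rest) ['m','a'] then
      match tokensB ((c :: rest).drop 2) with
      | none => none
      | some ts => some (['m','a'] :: ts)
    else none
termination_by s => s.length
decreasing_by all_goals simp

-- no_repeat: ts[0] != ts[1] and no_repeat(ts[1:])
def noRepeatB : List (List Char) → Bool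
  | [] => true
  | [_] => true
  | a :: b :: rest => a != b && noRepeatB (b :: rest)

def solution_alt (babbling : List String) : Int :=
  (babbling.countP (fun ba =>
    match tokensB ba.toList with
    | none => false
    | some ts => noRepeatB ts) : Nat)

-- ===== PRECONDITION & SPEC =====
def Spec_solution (babbling : List String) (out : Int) : Prop := out = solution_alt babbling
instance (babbling : List String) (out : Int) : Decidable (Spec_solution babbling out) := by unfold Spec_solution; infer_instance

-- ===== CLAIM (what is proved, stated in full; the proofs are below) =====
def Claim_equal_solution : Prop := ∀ (babbling : List String), Dom_solution babbling → Spec_solution babbling (solution babbling)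

-- ===== LEMMAS AND PROOFS =====

-- no-repeat condition threaded with a "previous token" seed, matching A's prev_ba
def chainOK (prev : List Char) : List (List Char) → Bool
  | [] => true
  | t :: ts => prev != t && chainOK t ts

theorem chainOK_eq_noRepeat (ts : List (List Char)) (t : List Char) :
    chainOK t ts = noRepeatB (t :: ts) := by
  induction ts generalizing t with
  | nil => rfl
  | cons b rest ih => simp [chainOK, noRepeatB, ih b]

theorem aFor_eq_find (ba prev : List Char) (i : Nat) (ps : List (List Char)) :
    aFor ba prev i ps =
      match ps.find? (fun p => PySem.Chars.startswith (ba.drop i) p) with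
      | none => none
      | some p => if prev == p then none else some (i + p.length, p) := by
  induction ps with
  | nil => rfl
  | cons q qs ih =>
    by_cases h : PySem.Chars.startswith (ba.drop i) q
    · simp [aFor, h, List.find?_cons_of_pos]
    · rw [aFor, if_neg h, ih, List.find?_cons_of_neg (by simp [h])]

-- tokensB's branch chain restated through find? over pronounceA
theorem tokensB_nonempty (c : Char) (rest : List Char) :
    tokensB (c :: rest) =
      match pronounceA.find? (fun p => PySem.Chars.startswith (c :: rest) p) with
      | none => none
      | some p =>
        match tokensB ((c :: rest).drop p.length) with
        | none => none
        | some ts => some (p :: ts) := by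
  rw [tokensB]
  split_ifs with h1 h2 h3 h4 <;>
    simp [pronounceA, List.find?, *]

theorem aWhile_eq (n : Nat) (ba : List Char) (i : Nat) (prev : List Char)
    (hn : ba.length - i ≤ n) :
    aWhile ba i prev =
      match tokensB (ba.drop i) with
      | none => false
      | some ts => chainOK prev ts := by
  induction n generalizing i prev with
  | zero =>
    have hi : ¬ i < ba.length := by omega
    rw [aWhile, if_neg hi, List.drop_eq_nil_of_le (by omega : ba.length ≤ i)]
    simp [tokensB, chainOK]
  | succ n ih =>
    by_cases hi : i < ba.length
    · rw [aWhile, if_pos hi]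
      cases hsd : ba.drop i with
      | nil => exact absurd (by simpa [List.drop_eq_nil_iff] using hsd) (by omega)
      | cons c rest =>
        rw [tokensB_nonempty]
        split
        · rename_i heq
          rw [aFor_eq_find, hsd] at heq
          cases hfind : pronounceA.find? (fun p => PySem.Chars.startswith (c :: rest) p) with
          | none => simp
          | some p =>
            rw [hfind] at heq
            simp only at heq
            split at heq
            · rename_i hpr
              simp only
              cases tokensB ((c :: rest).drop p.length) with
              | none => rfl
              | some ts => simp [chainOK, bne, hpr]
            · exact absurd heq (by simp)
        · rename_i i' p' heq
          rw [aFor_eq_find, hsd] at heq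
          cases hfind : pronounceA.find? (fun p => PySem.Chars.startswith (c :: rest) p) with
          | none => rw [hfind] at heq; exact absurd heq (by simp)
          | some p =>
            rw [hfind] at heq
            simp only at heq
            split at heq
            · exact absurd heq (by simp)
            · rename_i hpr
              have hinj := (Option.some.injEq _ _).mp heq
              have hi'' : i' = i + p.length := (congrArg Prod.fst hinj).symm
              have hp' : p' = p := (congrArg Prod.snd hinj).symm
              have hmem : p ∈ pronounceA := List.mem_of_find?_eq_some hfind
              have hplen : 0 < p.length :=
                List.length_pos_iff.mpr (pronounceA_ne_nil p hmem)
              have hdd : (c :: rest).drop p.length = ba.drop (i + p.length) := by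
                rw [← hsd, List.drop_drop]
              have hf : (prev == p) = false := by
                revert hpr; cases prev == p <;> simp
              rw [hi'', hp', ih (i + p.length) p (by omega)]
              rw [← hdd]
              simp only
              cases tokensB ((c :: rest).drop p.length) with
              | none => rfl
              | some ts => simp [chainOK, bne, hf]
    · rw [aWhile, if_neg hi, List.drop_eq_nil_of_le (by omega : ba.length ≤ i)]
      simp [tokensB, chainOK]

theorem tokensB_head_ne (s : List Char) (t : List Char) (ts : List (List Char))
    (h : tokensB s = some (t :: ts)) : t ≠ [] := by
  cases s with
  | nil => simp [tokensB] at h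
  | cons c rest =>
    rw [tokensB_nonempty] at h
    cases hfind : pronounceA.find? (fun p => PySem.Chars.startswith (c :: rest) p) with
    | none => rw [hfind] at h; simp at h
    | some p =>
      rw [hfind] at h
      simp only at h
      cases htk : tokensB ((c :: rest).drop p.length) with
      | none => rw [htk] at h; simp at h
      | some ts' =>
        rw [htk] at h
        have hinj := (Option.some.injEq _ _).mp h
        have ht : p = t := ((List.cons.injEq _ _ _ _).mp hinj).1
        exact ht ▸ pronounceA_ne_nil p (List.mem_of_find?_eq_some hfind)

theorem per_string (ba : List Char) :
    aWhile ba 0 [] =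
      match tokensB ba with
      | none => false
      | some ts => noRepeatB ts := by
  rw [aWhile_eq ba.length ba 0 [] (by omega)]
  simp only [List.drop_zero]
  cases htok : tokensB ba with
  | none => rfl
  | some ts =>
    cases ts with
    | nil => rfl
    | cons t ts' =>
      have htne : t ≠ [] := tokensB_head_ne ba t ts' htok
      simp only [chainOK, chainOK_eq_noRepeat]
      simp [Ne.symm htne]

theorem foldl_count (l : List String) (f : String → Bool) (acc : Int) :
    l.foldl (fun count ba => if f ba then count + 1 else count) acc
      = acc + ((l.countP f : Nat) : Int) := by
  induction l generalizing acc with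
  | nil => simp
  | cons x xs ih =>
    by_cases h : f x
    · simp only [List.foldl_cons, h, ih, List.countP_cons, if_pos]
      push_cast
      ring
    · simp [List.foldl_cons, h, ih]

-- ===== VERDICT (by name: the statement is the Claim_ definition above) =====
theorem solution_spec : Claim_equal_solution := by
  intro babbling _
  unfold Spec_solution solution solution_alt
  rw [foldl_count]
  have h : List.countP (fun ba => aWhile ba.toList 0 []) babbling
      = List.countP (fun ba =>
          match tokensB ba.toList with
          | none => false
          | some ts => noRepeatB ts) babbling :=
    List.countP_congr (fun ba _ => by simp [per_string ba.toList])
  simp [h]
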